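-- pv_equiv track=rewrite | github.com/erichaase/topcoder-python | topcoder/white_cells.py | solution
-- ===== SOURCE A (Python) =====
-- def solution (board):
--     count      = 0
--     white_even = True
--
--     for i in range(len(board)):
--         start = 0 if white_even else 1
--         for j in range(start, len(board[i]), 2):
--             if board[i][j] == 'F':
--                 count += 1
--         white_even = not white_even
--
--     return count
-- ===== SOURCE B (Python) =====
-- def solution(board):
--     return sum(1
--                for i, row in enumerate(board)
--                for j, c in enumerate(row)
--                if (i + j) % 2 == 0 and c == 'F')
-- ===== Notes on version B (the rewrite author's own statement) =====
-- stated objective: simpler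
-- what changed: A walks only the white cells with a stride-2 inner loop and an alternating start offset carried across rows; B is a single flat generator over all cells of enumerate(board)/enumerate(row) that counts a cell when (i+j) is even and the char is 'F'.
import Mathlib
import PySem

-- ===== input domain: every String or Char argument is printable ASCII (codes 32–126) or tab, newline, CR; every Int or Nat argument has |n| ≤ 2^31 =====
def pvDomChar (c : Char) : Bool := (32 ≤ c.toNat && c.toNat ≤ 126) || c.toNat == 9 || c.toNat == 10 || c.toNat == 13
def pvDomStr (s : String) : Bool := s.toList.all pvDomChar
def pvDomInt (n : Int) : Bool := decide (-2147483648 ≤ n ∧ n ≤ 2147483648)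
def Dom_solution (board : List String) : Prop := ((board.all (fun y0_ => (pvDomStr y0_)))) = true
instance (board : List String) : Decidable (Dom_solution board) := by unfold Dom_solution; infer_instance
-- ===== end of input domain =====

-- B replaces A's stride-2 walk over white cells (with an alternating start offset) by a
-- flat scan of all cells filtered by the parity test (i+j) % 2 == 0; same cost, simpler.

-- ===== PORT A =====
-- the body of A's outer loop: inner strided loop over one row, then flip white_even
def solutionRowStep (st : Int × Bool) (row : String) : Int × Bool :=
  let start : Int := if st.2 then 0 else 1
  ((PySem.List.pyRange start (PySem.Str.len row) 2).foldl
      (fun c j => if PySem.List.pyGetD row.toList j ' ' == 'F' then c + 1 else c) st.1,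
   !st.2)

def solution (board : List String) : Int :=
  ((PySem.List.pyRange 0 (PySem.List.len board)).foldl
      (fun st i => solutionRowStep st (PySem.List.pyGetD board i "")) (0, true)).1

-- ===== PORT B =====
def solution_alt (board : List String) : Int :=
  ((PySem.List.enumerate board).flatMap (fun ir =>
      (PySem.List.enumerate ir.2.toList).filter (fun jc =>
        (PySem.Int.mod (ir.1 + jc.1) 2 == 0) && (jc.2 == 'F')))).length

-- ===== PRECONDITION & SPEC =====
def Spec_solution (board : List String) (out : Int) : Prop := out = solution_alt board
instance (board : List String) (out : Int) : Decidable (Spec_solution board out) := by unfold Spec_solution; infer_instance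

-- ===== CLAIM (what is proved, stated in full; the proofs are below) =====
def Claim_equal_solution : Prop := ∀ (board : List String), Dom_solution board → Spec_solution board (solution board)

-- ===== LEMMAS AND PROOFS =====

-- the strided count over indices s, s+2, … equals the parity-filtered count over all indices
theorem pv_count_stride (P : Nat → Bool) (n s : Nat) (hs : s < 2) :
    List.countP (fun k => P (s + 2 * k)) (List.range ((n + 1 - s) / 2))
      = List.countP (fun j => decide (j % 2 = s) && P j) (List.range n) := by
  induction n with
  | zero =>
    interval_cases s <;> simp
  | succ n ih =>
    by_cases h : n % 2 = s
    · have hm : (n + 1 + 1 - s) / 2 = (n + 1 - s) / 2 + 1 := by omega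
      have hx : s + 2 * ((n + 1 - s) / 2) = n := by omega
      rw [List.range_succ, List.countP_append, hm, List.range_succ, List.countP_append, ih]
      simp [h, hx]
    · have hm : (n + 1 + 1 - s) / 2 = (n + 1 - s) / 2 := by omega
      rw [List.range_succ, List.countP_append, hm, ih]
      simp [h]

theorem pv_parity_succ (i : Int) :
    (!(PySem.Int.mod i 2 == 0)) = (PySem.Int.mod (i + 1) 2 == 0) := by
  rw [PySem.Int.mod_eq_emod_of_pos (by omega), PySem.Int.mod_eq_emod_of_pos (by omega)]
  rcases Int.emod_two_eq i with h | h <;> simp [h, Int.add_emod, Int.one_emod]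

-- one row: A's strided counting loop equals B's filter on that row
theorem pv_row (cs : List Char) (i : Int) (p : Bool)
    (hp : p = (PySem.Int.mod i 2 == 0)) (acc : Int) :
    (PySem.List.pyRange (if p then 0 else 1) ((cs.length : Int)) 2).foldl
        (fun c j => if PySem.List.pyGetD cs j ' ' == 'F' then c + 1 else c) acc
      = acc + ((PySem.List.enumerate cs).filter (fun jc =>
          (PySem.Int.mod (i + jc.1) 2 == 0) && (jc.2 == 'F'))).length := by
  rw [PySem.List.foldl_count_if]
  have hlen : ((PySem.List.enumerate cs).filter (fun jc =>
      (PySem.Int.mod (i + jc.1) 2 == 0) && (jc.2 == 'F'))).length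
      = List.countP (fun jc => (PySem.Int.mod (i + jc.1) 2 == 0) && (jc.2 == 'F'))
          (PySem.List.enumerate cs) := List.countP_eq_length_filter.symm
  rw [hlen]
  congr 1
  norm_cast
  -- rewrite B's side as a countP over List.range cs.length
  rw [PySem.List.enumerate_eq_map_pyRange cs ' ', List.countP_map]
  have hl : PySem.List.len cs = (cs.length : Int) := PySem.List.len_eq cs
  rw [hl, PySem.List.pyRange_zero_natCast, List.countP_map]
  -- set s' := parity offset as a Nat
  set s' : Nat := if p then 0 else 1 with hs'
  -- A's side: pyRange s' n 2 as a map over List.range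
  rw [PySem.List.pyRange_of_pos (s' : Int) (cs.length : Int) (by omega), List.countP_map]
  have hM : (if (s' : Int) < (cs.length : Int)
        then (((cs.length : Int) - s' + 2 - 1) / 2).toNat else 0)
      = (cs.length + 1 - s') / 2 := by
    have : s' < 2 := by by_cases hb : p <;> simp [hs', hb]
    split_ifs with hlt <;> omega
  rw [hM]
  have hs2 : s' < 2 := by by_cases hb : p <;> simp [hs', hb]
  have e1 : ((fun j => PySem.List.pyGetD cs j ' ' == 'F') ∘ fun k : Nat => (s' : Int) + 2 * (k : Int))
      = (fun k : Nat => PySem.List.pyGetD cs (((s' + 2 * k : Nat)) : Int) ' ' == 'F') := by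
    funext k
    have h : ((s' : Int) + 2 * (k : Int)) = ((s' + 2 * k : Nat) : Int) := by push_cast; ring
    simp only [Function.comp_apply, h]
  have e2 : (((fun jc : Int × Char => (PySem.Int.mod (i + jc.1) 2 == 0) && (jc.2 == 'F')) ∘
        fun j => (j, PySem.List.pyGetD cs j ' ')) ∘ fun k : Nat => (k : Int))
      = (fun j : Nat => (PySem.Int.mod (i + (j : Int)) 2 == 0) &&
          (PySem.List.pyGetD cs (j : Int) ' ' == 'F')) := by
    funext j
    rfl
  rw [e1, e2,
    pv_count_stride (fun j : Nat => PySem.List.pyGetD cs ((j : Nat) : Int) ' ' == 'F') cs.length s' hs2]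
  apply List.countP_congr
  intro j hj
  have hmod : PySem.Int.mod (i + (j : Int)) 2 = (i + (j : Int)) % 2 :=
    PySem.Int.mod_eq_emod_of_pos (by omega)
  have hpi : (i % 2 = 0) ↔ (s' = 0) := by
    by_cases hb : p
    · simp [hs', hb]
      have := hp
      rw [hb, PySem.Int.mod_eq_emod_of_pos (show (0:Int) < 2 by omega)] at this
      simpa using this.symm
    · simp [hs', hb]
      have := hp
      rw [PySem.Int.mod_eq_emod_of_pos (show (0:Int) < 2 by omega)] at this
      simp [hb] at this
      omega
  simp only [Bool.and_eq_true, decide_eq_true_eq, beq_iff_eq]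
  constructor
  · rintro ⟨h1, h2⟩
    rw [hmod]
    exact ⟨by omega, h2⟩
  · rintro ⟨h1, h2⟩
    rw [hmod] at h1
    exact ⟨by omega, h2⟩

theorem pv_outer (bs : List String) (i : Int) (p : Bool)
    (hp : p = (PySem.Int.mod i 2 == 0)) (acc : Int) :
    (bs.foldl solutionRowStep (acc, p)).1
      = acc + (((PySem.List.enumerate bs i).flatMap (fun ir =>
          (PySem.List.enumerate ir.2.toList).filter (fun jc =>
            (PySem.Int.mod (ir.1 + jc.1) 2 == 0) && (jc.2 == 'F')))).length : Int) := by
  induction bs generalizing i p acc with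
  | nil => simp [PySem.List.enumerate]
  | cons r bs ih =>
    rw [List.foldl_cons]
    have hstep : solutionRowStep (acc, p) r
        = (acc + (((PySem.List.enumerate r.toList).filter (fun jc =>
            (PySem.Int.mod (i + jc.1) 2 == 0) && (jc.2 == 'F'))).length : Int), !p) := by
      unfold solutionRowStep
      simp only [PySem.Str.len_eq]
      rw [pv_row r.toList i p hp acc]
    rw [hstep, ih (i + 1) (!p) (by rw [hp, pv_parity_succ i])]
    rw [PySem.List.enumerate_cons, List.flatMap_cons, List.length_append]
    push_cast
    ring

-- ===== VERDICT (by name: the statement is the Claim_ definition above) =====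
theorem solution_spec : Claim_equal_solution := by
  intro board _
  unfold Spec_solution solution solution_alt
  rw [PySem.List.foldl_pyRange_zero_pyGetD board ""
      (fun st row => solutionRowStep st row) (0, true)]
  rw [pv_outer board 0 true (by decide) 0]
  simp
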